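-- pv_equiv track=rewrite | github.com/Zikun-Yang/VAMPIRE | src/vampire/_report_utils/_motif_processing.py | canonicalize_motif
-- ===== SOURCE A (Python) =====
-- def canonicalize_motif(motif: str) -> str:
--     """
--     Canonicalize motif using Booth algorithm (O(n)).
--     Returns the lexicographically smallest cyclic rotation.
--     """
--     if not motif:
--         return motif
--
--     s = motif * 2
--     n = len(motif)
--
--     i, j, k = 0, 1, 0
--     while i < n and j < n and k < n:
--         if s[i + k] == s[j + k]:
--             k += 1
--         elif s[i + k] > s[j + k]:
--             i = i + k + 1
--             if i <= j:
--                 i = j + 1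
--             k = 0
--         else:
--             j = j + k + 1
--             if j <= i:
--                 j = i + 1
--             k = 0
--     start = min(i, j)
--     return s[start:start + n]
-- ===== SOURCE B (Python) =====
-- def canonicalize_motif(motif: str) -> str:
--     """Brute force: lexicographic minimum over all cyclic rotations."""
--     if not motif:
--         return motif
--     n = len(motif)
--     return min(motif[i:] + motif[:i] for i in range(n))
-- ===== Notes on version B (the rewrite author's own statement) =====
-- stated objective: simpler
-- what changed: Replaced Booth's O(n) two-pointer candidate-elimination loop over the doubled string with a two-line brute force that builds all n cyclic rotations by slicing and takes their lexicographic minimum.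
import Mathlib
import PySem

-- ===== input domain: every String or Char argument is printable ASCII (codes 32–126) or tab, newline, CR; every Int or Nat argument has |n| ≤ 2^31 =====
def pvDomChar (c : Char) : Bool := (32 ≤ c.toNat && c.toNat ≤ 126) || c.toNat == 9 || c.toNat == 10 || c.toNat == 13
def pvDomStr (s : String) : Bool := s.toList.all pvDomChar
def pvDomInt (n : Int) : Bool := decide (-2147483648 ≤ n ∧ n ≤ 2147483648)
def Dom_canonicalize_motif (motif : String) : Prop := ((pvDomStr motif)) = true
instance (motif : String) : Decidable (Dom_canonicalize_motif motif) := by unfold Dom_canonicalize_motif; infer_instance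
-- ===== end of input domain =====

-- B replaces Booth's O(n) two-pointer elimination loop with a brute-force minimum over all n
-- cyclic rotations (simpler, not faster); the return values are proved identical on all inputs.

-- ===== PORT A =====
-- the while-loop of A: state (i, j, k); returns the final (i, j)
def boothLoop (cs : List Char) (n : Nat) (i j k : Nat) : Nat × Nat :=
  if h : i < n ∧ j < n ∧ k < n then
    if cs.getD (i + k) 'a' = cs.getD (j + k) 'a' then
      boothLoop cs n i j (k + 1)
    else if cs.getD (j + k) 'a' < cs.getD (i + k) 'a' then   -- s[i+k] > s[j+k]
      boothLoop cs n (if i + k + 1 ≤ j then j + 1 else i + k + 1) j 0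
    else
      boothLoop cs n i (if j + k + 1 ≤ i then i + 1 else j + k + 1) 0
  else (i, j)
termination_by 3 * n - (i + j + k)
decreasing_by all_goals first | omega | (split <;> omega)

def canonicalize_motif (motif : String) : String :=
  let w := motif.toList
  if w = [] then motif
  else
    let cs := w ++ w             -- s = motif * 2
    let n := w.length
    let r := boothLoop cs n 0 1 0
    let start := min r.1 r.2
    String.ofList (PySem.List.slice cs (some (start : Int)) (some ((start : Int) + (n : Int))))

-- ===== PORT B =====
def canonicalize_motif_alt (motif : String) : String :=
  let w := motif.toList
  if w = [] then motif
  else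
    let rots := (List.range w.length).map (fun i => w.drop i ++ w.take i)
    match PySem.List.min? rots (fun x => x) with
    | some m => String.ofList m
    | none => motif

-- ===== PRECONDITION & SPEC =====
def Spec_canonicalize_motif (motif : String) (out : String) : Prop := out = canonicalize_motif_alt motif
instance (motif : String) (out : String) : Decidable (Spec_canonicalize_motif motif out) := by unfold Spec_canonicalize_motif; infer_instance

-- ===== CLAIM (what is proved, stated in full; the proofs are below) =====
def Claim_equal_canonicalize_motif : Prop := ∀ (motif : String), Dom_canonicalize_motif motif → Spec_canonicalize_motif motif (canonicalize_motif motif)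

-- ===== LEMMAS AND PROOFS =====

-- the character of the circular word at absolute position x
def cAt (w : List Char) (x : Nat) : Char := w.getD (x % w.length) 'a'

-- position p is eliminated: some rotation is strictly lexicographically smaller
def elimR (w : List Char) (p : Nat) : Prop := ∃ q, w.rotate q < w.rotate p

-- invariant of boothLoop
def boothInv (w : List Char) (i j k : Nat) : Prop :=
  i ≠ j ∧ min i j < w.length ∧
  (∀ t, t < k → cAt w (i + t) = cAt w (j + t)) ∧
  (∀ p, p < max i j → p ≠ min i j → elimR w p)

theorem length_pos_of_ne_nil' {w : List Char} (hw : w ≠ []) : 0 < w.length := by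
  cases w with
  | nil => exact absurd rfl hw
  | cons a l => simp

-- reading the doubled string is reading the circular word
theorem csAt (w : List Char) (_hn : 0 < w.length) (x : Nat) (hx : x < 2 * w.length) :
    (w ++ w).getD x 'a' = cAt w x := by
  unfold cAt
  by_cases h : x < w.length
  · rw [Nat.mod_eq_of_lt h, List.getD_append _ _ _ _ h]
  · have h1 : w.length ≤ x := le_of_not_gt h
    have h2 : x - w.length < w.length := by omega
    rw [List.getD_append_right _ _ _ _ h1, Nat.mod_eq_sub_mod h1, Nat.mod_eq_of_lt h2]

theorem getD_rotate (w : List Char) (hn : 0 < w.length) (p t : Nat) (ht : t < w.length) :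
    (w.rotate p).getD t 'a' = cAt w (p + t) := by
  have hlt : t < (w.rotate p).length := by rw [List.length_rotate]; exact ht
  rw [List.getD_eq_getElem _ _ hlt, List.getElem_rotate]
  unfold cAt
  rw [List.getD_eq_getElem _ _ (Nat.mod_lt _ hn)]
  simp [Nat.add_comm]

theorem rot_ext (w : List Char) (hn : 0 < w.length) (i j : Nat)
    (h : ∀ t, t < w.length → cAt w (i + t) = cAt w (j + t)) :
    w.rotate i = w.rotate j := by
  apply List.ext_getElem (by simp)
  intro t h1 h2
  have ht : t < w.length := by simpa using h1
  have e1 := getD_rotate w hn i t ht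
  have e2 := getD_rotate w hn j t ht
  rw [List.getD_eq_getElem _ _ h1] at e1
  rw [List.getD_eq_getElem _ _ h2] at e2
  rw [e1, e2]; exact h t ht

-- lexicographic order from first difference (equal lengths)
theorem lex_lt_of_getD : ∀ (u v : List Char) (m : Nat), u.length = v.length → m < u.length →
    (∀ t, t < m → u.getD t 'a' = v.getD t 'a') → u.getD m 'a' < v.getD m 'a' → u < v := by
  intro u
  induction u with
  | nil => intro v m _ hm _ _; simp at hm
  | cons x u' ih =>
    intro v m hlen hm hpre hlt
    cases v with
    | nil => simp at hlen
    | cons y v' =>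
      cases m with
      | zero =>
        simp only [List.getD_cons_zero] at hlt
        exact List.cons_lt_cons_iff.mpr (Or.inl hlt)
      | succ m' =>
        have hxy : x = y := by simpa using hpre 0 (Nat.succ_pos m')
        exact List.cons_lt_cons_iff.mpr (Or.inr ⟨hxy,
          ih v' m' (by simpa using hlen) (by simpa using hm)
            (fun t ht => by simpa using hpre (t + 1) (by omega)) (by simpa using hlt)⟩)

-- elimination core: matched prefix plus one strictly larger character orders the rotations
theorem rot_lt (w : List Char) (hn : 0 < w.length) (i j k : Nat) (hk : k < w.length)
    (hm : ∀ t, t < k → cAt w (i + t) = cAt w (j + t)) (hc : cAt w (j + k) < cAt w (i + k)) :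
    ∀ t, t ≤ k → w.rotate (j + t) < w.rotate (i + t) := by
  intro t ht
  apply lex_lt_of_getD _ _ (k - t) (by simp) (by rw [List.length_rotate]; omega)
  · intro s hs
    rw [getD_rotate w hn _ s (by omega), getD_rotate w hn _ s (by omega)]
    have h1 : j + t + s = j + (t + s) := by omega
    have h2 : i + t + s = i + (t + s) := by omega
    rw [h1, h2, hm (t + s) (by omega)]
  · rw [getD_rotate w hn _ _ (by omega), getD_rotate w hn _ _ (by omega)]
    have h1 : j + t + (k - t) = j + k := by omega
    have h2 : i + t + (k - t) = i + k := by omega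
    rw [h1, h2]; exact hc

theorem exists_min_rot (w : List Char) (hn : 0 < w.length) :
    ∃ p0, p0 < w.length ∧ ∀ q, w.rotate p0 ≤ w.rotate q := by
  obtain ⟨p0, hp0, hmin⟩ := Finset.exists_min_image (Finset.range w.length)
    (fun p => w.rotate p) ⟨0, Finset.mem_range.mpr hn⟩
  refine ⟨p0, Finset.mem_range.mp hp0, fun q => ?_⟩
  have hq : w.rotate (q % w.length) = w.rotate q := List.rotate_mod w q
  rw [← hq]
  exact hmin _ (Finset.mem_range.mpr (Nat.mod_lt _ hn))

theorem not_elim_of_min (w : List Char) (p : Nat) (hmin : ∀ q, w.rotate p ≤ w.rotate q) :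
    ¬ elimR w p := by
  rintro ⟨q, hq⟩
  exact absurd (hmin q) (not_le.mpr hq)

theorem boothInv_symm (w : List Char) (i j k : Nat) (h : boothInv w i j k) : boothInv w j i k := by
  obtain ⟨h1, h2, h3, h4⟩ := h
  refine ⟨h1.symm, by rwa [Nat.min_comm], fun t ht => (h3 t ht).symm, ?_⟩
  intro p hp hne
  exact h4 p (by rwa [Nat.max_comm]) (by rwa [Nat.min_comm])

-- preservation for the branch that advances i (Python's s[i+k] > s[j+k] branch)
theorem inv_step_i (w : List Char) (hn : 0 < w.length) (i j k : Nat)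
    (hinv : boothInv w i j k) (_hi : i < w.length) (hj : j < w.length) (hk : k < w.length)
    (hc : cAt w (j + k) < cAt w (i + k)) :
    boothInv w (if i + k + 1 ≤ j then j + 1 else i + k + 1) j 0 := by
  obtain ⟨hne, hmin, hmatch, helim⟩ := hinv
  have hminmax : (min i j = i ∧ max i j = j ∧ i ≤ j) ∨ (min i j = j ∧ max i j = i ∧ j ≤ i) := by
    rcases le_total i j with h | h
    · exact Or.inl ⟨min_eq_left h, max_eq_right h, h⟩
    · exact Or.inr ⟨min_eq_right h, max_eq_left h, h⟩
  set i' := if i + k + 1 ≤ j then j + 1 else i + k + 1 with hi'def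
  have hi'cases : (i + k + 1 ≤ j ∧ i' = j + 1) ∨ (j < i + k + 1 ∧ i' = i + k + 1) := by
    rw [hi'def]; split
    · exact Or.inl ⟨by assumption, rfl⟩
    · exact Or.inr ⟨by omega, rfl⟩
  have hji' : j < i' := by rcases hi'cases with ⟨h, e⟩ | ⟨h, e⟩ <;> omega
  have hnew : ∀ t, t ≤ k → elimR w (i + t) :=
    fun t ht => ⟨j + t, rot_lt w hn i j k hk hmatch hc t ht⟩
  refine ⟨by omega, ?_, fun t ht => absurd ht (Nat.not_lt_zero t), ?_⟩
  · rw [min_eq_right (le_of_lt hji')]; exact hj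
  · rw [max_eq_left (le_of_lt hji'), min_eq_right (le_of_lt hji')]
    intro p hp hpj
    by_cases hcase : i ≤ p ∧ p ≤ i + k
    · have hpe : p = i + (p - i) := by omega
      rw [hpe]; exact hnew (p - i) (by omega)
    · apply helim p
      · rcases hminmax with ⟨e1, e2, h⟩ | ⟨e1, e2, h⟩ <;>
          rcases hi'cases with ⟨h', e⟩ | ⟨h', e⟩ <;> omega
      · rcases hminmax with ⟨e1, e2, h⟩ | ⟨e1, e2, h⟩ <;> omega

-- end-of-loop analysis: the surviving candidate min i j starts a minimal rotation
theorem booth_end (w : List Char) (hw : w ≠ []) (i j k : Nat) (hinv : boothInv w i j k)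
    (hstop : ¬(i < w.length ∧ j < w.length ∧ k < w.length)) :
    min i j < w.length ∧ ∀ p, w.rotate (min i j) ≤ w.rotate p := by
  have hn := length_pos_of_ne_nil' hw
  obtain ⟨hne, hminlt, hmatch, helim⟩ := hinv
  have hminmax : (min i j = i ∧ max i j = j ∧ i ≤ j) ∨ (min i j = j ∧ max i j = i ∧ j ≤ i) := by
    rcases le_total i j with h | h
    · exact Or.inl ⟨min_eq_left h, max_eq_right h, h⟩
    · exact Or.inr ⟨min_eq_right h, max_eq_left h, h⟩
  have hab : min i j < max i j := by rcases hminmax with ⟨e1, e2, h⟩ | ⟨e1, e2, h⟩ <;> omega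
  refine ⟨hminlt, ?_⟩
  obtain ⟨p0, hp0n, hp0⟩ := exists_min_rot w hn
  have hp0e : ¬ elimR w p0 := not_elim_of_min w p0 hp0
  suffices hsuff : w.rotate (min i j) = w.rotate p0 by
    intro p; rw [hsuff]; exact hp0 p
  by_cases hbn : w.length ≤ max i j
  · -- one candidate ran off the end: every p < n except min i j is eliminated
    by_cases hpa : p0 = min i j
    · rw [hpa]
    · exact absurd (helim p0 (by omega) hpa) hp0e
  · -- full match: k ≥ n, the word is periodic with period max - min
    rw [not_le] at hbn
    have hkn : w.length ≤ k := by
      rcases hminmax with ⟨e1, e2, h⟩ | ⟨e1, e2, h⟩ <;> omega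
    have hrij : w.rotate i = w.rotate j := rot_ext w hn i j (fun t ht => hmatch t (by omega))
    have hrab : w.rotate (min i j) = w.rotate (max i j) := by
      rcases hminmax with ⟨e1, e2, _⟩ | ⟨e1, e2, _⟩
      · rw [e1, e2]; exact hrij
      · rw [e1, e2]; exact hrij.symm
    have hshift : ∀ p, w.rotate (min i j + p) = w.rotate (min i j + p + (max i j - min i j)) := by
      intro p
      calc w.rotate (min i j + p) = (w.rotate (min i j)).rotate p := (List.rotate_rotate w _ p).symm
        _ = (w.rotate (max i j)).rotate p := by rw [hrab]
        _ = w.rotate (max i j + p) := List.rotate_rotate w _ p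
        _ = w.rotate (min i j + p + (max i j - min i j)) := by congr 1; omega
    have descend : ∀ p, min i j ≤ p → (∀ q, w.rotate p ≤ w.rotate q) → w.rotate p = w.rotate (min i j) := by
      intro p
      induction p using Nat.strong_induction_on with
      | _ p IH =>
        intro hap hminp
        by_cases hpa : p = min i j
        · rw [hpa]
        · have hnel := not_elim_of_min w p hminp
          have hpb : max i j ≤ p := by
            by_contra hcc
            exact hnel (helim p (by omega) hpa)
          have h1 : w.rotate (p - (max i j - min i j)) = w.rotate p := by
            have hs := hshift (p - (max i j - min i j) - min i j)
            have e1 : min i j + (p - (max i j - min i j) - min i j) = p - (max i j - min i j) := by omega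
            have e2 : p - (max i j - min i j) + (max i j - min i j) = p := by omega
            rw [e1, e2] at hs
            exact hs
          have hmin' : ∀ q, w.rotate (p - (max i j - min i j)) ≤ w.rotate q := by
            intro q; rw [h1]; exact hminp q
          have hrec := IH (p - (max i j - min i j)) (by omega) (by omega) hmin'
          rw [← h1, hrec]
    by_cases hpa : p0 = min i j
    · rw [hpa]
    · have hpb : max i j ≤ p0 := by
        by_contra hcc
        exact hp0e (helim p0 (by omega) hpa)
      exact (descend p0 (by omega) hp0).symm

-- running the loop from any invariant state yields a minimal-rotation start below n
theorem booth_loop_min (w : List Char) (hw : w ≠ []) :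
    ∀ m i j k, 3 * w.length - (i + j + k) ≤ m → boothInv w i j k →
    min (boothLoop (w ++ w) w.length i j k).1 (boothLoop (w ++ w) w.length i j k).2 < w.length ∧
    ∀ p, w.rotate (min (boothLoop (w ++ w) w.length i j k).1
          (boothLoop (w ++ w) w.length i j k).2) ≤ w.rotate p := by
  have hn := length_pos_of_ne_nil' hw
  intro m
  induction m with
  | zero =>
    intro i j k hm hinv
    have hstop : ¬(i < w.length ∧ j < w.length ∧ k < w.length) := by omega
    rw [boothLoop.eq_def, dif_neg hstop]
    exact booth_end w hw i j k hinv hstop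
  | succ m ih =>
    intro i j k hm hinv
    by_cases h : i < w.length ∧ j < w.length ∧ k < w.length
    · obtain ⟨hi, hj, hk⟩ := h
      have hik : i + k < 2 * w.length := by omega
      have hjk : j + k < 2 * w.length := by omega
      rw [boothLoop.eq_def, dif_pos ⟨hi, hj, hk⟩]
      by_cases heq : (w ++ w).getD (i + k) 'a' = (w ++ w).getD (j + k) 'a'
      · rw [if_pos heq]
        apply ih i j (k + 1) (by omega)
        obtain ⟨h1, h2, h3, h4⟩ := hinv
        refine ⟨h1, h2, ?_, h4⟩
        intro t ht
        rcases Nat.lt_or_ge t k with h' | h'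
        · exact h3 t h'
        · have ht' : t = k := by omega
          subst ht'
          rw [← csAt w hn _ hik, ← csAt w hn _ hjk]
          exact heq
      · rw [if_neg heq]
        by_cases hgt : (w ++ w).getD (j + k) 'a' < (w ++ w).getD (i + k) 'a'
        · rw [if_pos hgt]
          have hc : cAt w (j + k) < cAt w (i + k) := by
            rw [← csAt w hn _ hik, ← csAt w hn _ hjk]; exact hgt
          apply ih _ j 0 ?_ (inv_step_i w hn i j k hinv hi hj hk hc)
          split <;> omega
        · rw [if_neg hgt]
          have hc : cAt w (i + k) < cAt w (j + k) := by
            rw [← csAt w hn _ hik, ← csAt w hn _ hjk]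
            exact lt_of_le_of_ne (not_lt.mp hgt) heq
          have hinv' := boothInv_symm w _ _ _
            (inv_step_i w hn j i k (boothInv_symm w i j k hinv) hj hi hk hc)
          apply ih i _ 0 ?_ hinv'
          split <;> omega
    · rw [boothLoop.eq_def, dif_neg h]
      exact booth_end w hw i j k hinv h

-- the final slice of the doubled string is the rotation at start
theorem slice_rot (w : List Char) (hw : w ≠ []) (start : Nat) (hs : start < w.length) :
    PySem.List.slice (w ++ w) (some (start : Int)) (some ((start : Int) + (w.length : Int)))
      = w.rotate start := by
  have hn := length_pos_of_ne_nil' hw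
  have hcast : ((start : Int) + (w.length : Int)) = ((start + w.length : Nat) : Int) := by
    push_cast; ring
  rw [hcast, PySem.List.slice_toNat _ (by positivity) (by positivity)]
  simp only [Int.toNat_natCast]
  have he : start + w.length - start = w.length := by omega
  rw [he]
  apply List.ext_getElem
  · simp [List.length_rotate]
    omega
  · intro t h1 h2
    have ht : t < w.length := by simpa [List.length_rotate] using h2
    rw [List.getElem_rotate]
    rw [List.getElem_take, List.getElem_drop]
    by_cases hcase : start + t < w.length
    · rw [List.getElem_append_left (by omega)]
      congr 1
      rw [Nat.mod_eq_of_lt (by omega)]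
      omega
    · rw [List.getElem_append_right (by omega)]
      congr 1
      rw [Nat.mod_eq_sub_mod (by omega), Nat.mod_eq_of_lt (by omega)]
      omega

-- ===== VERDICT (by name: the statement is the Claim_ definition above) =====
theorem canonicalize_motif_spec : Claim_equal_canonicalize_motif := by
  unfold Claim_equal_canonicalize_motif Spec_canonicalize_motif
  intro motif _
  by_cases hw : motif.toList = []
  · simp [canonicalize_motif, canonicalize_motif_alt, hw]
  · have hn := length_pos_of_ne_nil' hw
    obtain ⟨hstart, hmin⟩ := booth_loop_min motif.toList hw (3 * motif.toList.length) 0 1 0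
      (by omega)
      ⟨by omega, by simpa using hn, fun t ht => absurd ht (Nat.not_lt_zero t),
       fun p hp hpn => by simp at hp hpn; omega⟩
    rcases hres : PySem.List.min?
        ((List.range motif.toList.length).map (fun i => motif.toList.drop i ++ motif.toList.take i))
        (fun x => x) with _ | m
    · rw [PySem.List.min?_eq_none_iff] at hres
      rw [List.map_eq_nil_iff, List.range_eq_nil] at hres
      omega
    · have hmem := PySem.List.min?_mem hres
      set q := min (boothLoop (motif.toList ++ motif.toList) motif.toList.length 0 1 0).1
          (boothLoop (motif.toList ++ motif.toList) motif.toList.length 0 1 0).2 with hqdef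
      obtain ⟨p, hp, hpm⟩ := List.mem_map.mp hmem
      have hpn : p < motif.toList.length := List.mem_range.mp hp
      have hrotm : motif.toList.rotate p = m := by
        rw [List.rotate_eq_drop_append_take (le_of_lt hpn)]; exact hpm
      have hmemrot : motif.toList.rotate q ∈
          (List.range motif.toList.length).map
            (fun i => motif.toList.drop i ++ motif.toList.take i) := by
        rw [List.mem_map]
        refine ⟨q, List.mem_range.mpr hstart, ?_⟩
        show motif.toList.drop q ++ motif.toList.take q = motif.toList.rotate q
        exact (List.rotate_eq_drop_append_take (le_of_lt hstart)).symm
      have hle1 : m ≤ motif.toList.rotate q := by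
        refine PySem.List.min?_isMin (key := fun x => x) ?_ _ hmemrot
        convert hres using 2
      have hle2 : motif.toList.rotate q ≤ m := by
        rw [← hrotm]; exact hmin p
      have hm : m = motif.toList.rotate q := le_antisymm hle1 hle2
      simp only [canonicalize_motif, canonicalize_motif_alt, if_neg hw, hres]
      rw [← hqdef, slice_rot motif.toList hw q hstart, hm]
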